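-- pv_equiv track=rewrite | github.com/ldct/cp | dmoj/dmopc21c3/B/B.py | p_slow
-- ===== SOURCE A (Python) =====
-- def p_slow(arr):
--     e, o = 0, 0
--     for i in range(len(arr)):
--         for j in range(i+1, len(arr)+1):
--             if sum(arr[i:j]) % 2 == 0:
--                 e += 1
--             else:
--                 o += 1
--     return e, o
-- ===== SOURCE B (Python) =====
-- def p_slow(arr):
--     c0, c1, p = 1, 0, 0
--     for x in arr:
--         p = (p + x) % 2
--         if p == 0:
--             c0 += 1
--         else:
--             c1 += 1
--     n = len(arr)
--     e = c0 * (c0 - 1) // 2 + c1 * (c1 - 1) // 2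
--     return e, n * (n + 1) // 2 - e
-- ===== Notes on version B (the rewrite author's own statement) =====
-- stated objective: faster
-- what changed: Replaced the nested enumeration of all subarrays with re-summed slices by a single pass over prefix-sum parities: count even/odd prefix parities and combine them with the pairs formula C(c,2), odd = total pairs - even.
import Mathlib
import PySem

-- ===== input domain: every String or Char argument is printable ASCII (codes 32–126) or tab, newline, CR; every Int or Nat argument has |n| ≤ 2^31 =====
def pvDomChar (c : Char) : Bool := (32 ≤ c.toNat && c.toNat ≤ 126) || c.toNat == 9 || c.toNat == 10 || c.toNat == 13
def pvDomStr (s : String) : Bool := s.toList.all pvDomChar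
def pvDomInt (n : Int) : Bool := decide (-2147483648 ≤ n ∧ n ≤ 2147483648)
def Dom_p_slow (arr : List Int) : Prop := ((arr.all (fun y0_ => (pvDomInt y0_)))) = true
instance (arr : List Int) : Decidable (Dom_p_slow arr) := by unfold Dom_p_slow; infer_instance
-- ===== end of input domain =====

-- B replaces A's cubic all-subarray re-summation by a linear prefix-parity count (asymptotically faster).

-- ===== PORT A =====
def p_slow (arr : List Int) : List Int :=
  let n : Int := arr.length
  let eo := (PySem.List.pyRange 0 n 1).foldl (fun (eo : Int × Int) i =>
    (PySem.List.pyRange (i + 1) (n + 1) 1).foldl (fun (eo : Int × Int) j =>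
      if PySem.Int.mod (PySem.List.slice arr (some i) (some j)).sum 2 == 0
      then (eo.1 + 1, eo.2) else (eo.1, eo.2 + 1)) eo) (0, 0)
  [eo.1, eo.2]

-- ===== PORT B =====
def p_slow_alt (arr : List Int) : List Int :=
  let s := arr.foldl (fun (st : Int × Int × Int) x =>
    let p := PySem.Int.mod (st.2.2 + x) 2
    if p == 0 then (st.1 + 1, st.2.1, p) else (st.1, st.2.1 + 1, p)) (1, 0, 0)
  let n : Int := arr.length
  let e := PySem.Int.floordiv (s.1 * (s.1 - 1)) 2 + PySem.Int.floordiv (s.2.1 * (s.2.1 - 1)) 2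
  [e, PySem.Int.floordiv (n * (n + 1)) 2 - e]

-- ===== PRECONDITION & SPEC =====
def Spec_p_slow (arr : List Int) (out : List Int) : Prop := out = p_slow_alt arr
instance (arr : List Int) (out : List Int) : Decidable (Spec_p_slow arr out) := by unfold Spec_p_slow; infer_instance

-- ===== CLAIM (what is proved, stated in full; the proofs are below) =====
def Claim_equal_p_slow : Prop := ∀ (arr : List Int), Dom_p_slow arr → Spec_p_slow arr (p_slow arr)

-- ===== LEMMAS AND PROOFS =====

-- prefix sum of the first k elements
def psum (arr : List Int) (k : Nat) : Int := (arr.take k).sum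

-- parity (evenness) of the k-th prefix sum
def ppar (arr : List Int) (k : Nat) : Bool := psum arr k % 2 == 0

-- list of prefix parities from index s to arr.length
def parsFrom (arr : List Int) (s : Nat) : List Bool :=
  (List.range' s (arr.length + 1 - s)).map (ppar arr)

-- number of equal-parity (i, j) pairs, i < j, in a parity list
def eqp : List Bool → Nat
  | [] => 0
  | a :: t => t.count a + eqp t

-- triangular number: number of pairs added by A's inner loops
def tri (m : Nat) : Nat := m * (m + 1) / 2

-- === generic loop shapes ===

-- A's inner loop: classify each j as even/odd, starting from accumulator (e, o)
lemma inner_fold (L : List Int) (C : Int → Bool) : ∀ (e o : Int),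
    L.foldl (fun (eo : Int × Int) j => if C j then (eo.1 + 1, eo.2) else (eo.1, eo.2 + 1)) (e, o)
      = (e + (L.countP C : Int), o + ((L.length : Int) - (L.countP C : Int))) := by
  induction L with
  | nil => intro e o; simp
  | cons x t ih =>
    intro e o
    by_cases h : C x = true
    · simp [List.foldl_cons, h, ih]
      omega
    · simp only [Bool.not_eq_true] at h
      simp [List.foldl_cons, h, ih]
      omega

-- sum of a slice is a difference of prefix sums
lemma sum_slice (arr : List Int) (i j : Nat) (hij : i ≤ j) :
    (PySem.List.slice arr (some (i : Int)) (some (j : Int))).sum = psum arr j - psum arr i := by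
  rw [PySem.List.slice_natCast]
  have h : arr.take j = arr.take i ++ (arr.drop i).take (j - i) := by
    conv_lhs => rw [show j = i + (j - i) by omega]
    rw [List.take_add]
  unfold psum
  rw [h, List.sum_append]
  ring

-- evenness of a difference is agreement of evenness
lemma parity_sub (x y : Int) : ((x - y) % 2 == 0) = ((x % 2 == 0) == (y % 2 == 0)) := by
  rcases Int.emod_two_eq x with h | h <;> rcases Int.emod_two_eq y with h' | h' <;>
    simp [h, h'] <;> omega

-- A's inner count at outer index s is a count of matching later prefix parities
lemma cnt_pyRange (arr : List Int) (s : Nat) (hs : s ≤ arr.length) :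
    (PySem.List.pyRange ((s : Int) + 1) ((arr.length : Int) + 1) 1).countP
        (fun j => PySem.Int.mod (PySem.List.slice arr (some (s : Int)) (some j)).sum 2 == 0)
      = (parsFrom arr (s + 1)).count (ppar arr s) := by
  rw [PySem.List.pyRange_one, List.countP_map]
  unfold parsFrom
  rw [List.count_eq_countP, List.countP_map, List.range'_eq_map_range, List.countP_map]
  have hlen : (((arr.length : Int) + 1) - ((s : Int) + 1)).toNat = arr.length + 1 - (s + 1) := by
    omega
  rw [hlen]
  apply List.countP_congr
  intro k _
  have hj : ((s : Int) + 1 + (k : Int)) = ((s + 1 + k : Nat) : Int) := by push_cast; ring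
  have hb : (PySem.Int.mod (PySem.List.slice arr (some (s : Int)) (some ((s : Int) + 1 + (k : Int)))).sum 2 == 0)
      = (ppar arr (s + 1 + k) == ppar arr s) := by
    rw [hj, PySem.Int.mod_eq_emod_of_pos (by norm_num),
        sum_slice arr s (s + 1 + k) (by omega), parity_sub]
    rfl
  simp only [Function.comp_apply]
  rw [hb]

-- peel the head of the prefix-parity list
lemma parsFrom_cons (arr : List Int) (s : Nat) (hs : s ≤ arr.length) :
    parsFrom arr s = ppar arr s :: parsFrom arr (s + 1) := by
  unfold parsFrom
  have h : arr.length + 1 - s = (arr.length + 1 - (s + 1)) + 1 := by omega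
  rw [h, List.range'_succ, List.map_cons]

lemma tri_succ (k : Nat) : tri (k + 1) = tri k + (k + 1) := by
  unfold tri
  have h : (k + 1) * (k + 1 + 1) = k * (k + 1) + (k + 1) * 2 := by ring
  rw [h, Nat.add_mul_div_right _ _ (by norm_num)]

lemma eqp_last (arr : List Int) : eqp (parsFrom arr arr.length) = 0 := by
  unfold parsFrom
  have h : arr.length + 1 - arr.length = 1 := by omega
  rw [h]
  simp [eqp, List.range']

-- A's outer loop from index s computes the equal-parity pair count of the suffix
lemma outer_fold (arr : List Int) : ∀ (m s : Nat) (e o : Int), s + m = arr.length →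
    (PySem.List.pyRange (s : Int) (arr.length : Int) 1).foldl
      (fun (eo : Int × Int) i =>
        (PySem.List.pyRange (i + 1) ((arr.length : Int) + 1) 1).foldl
          (fun (eo : Int × Int) j =>
            if PySem.Int.mod (PySem.List.slice arr (some i) (some j)).sum 2 == 0
            then (eo.1 + 1, eo.2) else (eo.1, eo.2 + 1)) eo) (e, o)
      = (e + (eqp (parsFrom arr s) : Int),
         o + (tri m : Int) - (eqp (parsFrom arr s) : Int)) := by
  intro m
  induction m with
  | zero =>
    intro s e o hsm
    have hs : (s : Int) = (arr.length : Int) := by omega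
    rw [hs, PySem.List.pyRange_one_eq_nil (by omega)]
    have : s = arr.length := by omega
    simp [List.foldl_nil, this, eqp_last, tri]
  | succ k ih =>
    intro s e o hsm
    have hslt : (s : Int) < (arr.length : Int) := by omega
    rw [PySem.List.pyRange_one_cons hslt, List.foldl_cons]
    rw [inner_fold]
    rw [cnt_pyRange arr s (by omega)]
    have hlen : ((PySem.List.pyRange ((s : Int) + 1) ((arr.length : Int) + 1) 1).length : Int)
        = (k : Int) + 1 := by
      rw [PySem.List.length_pyRange_one]; omega
    rw [hlen]
    have hs1 : ((s : Int) + 1) = ((s + 1 : Nat) : Int) := by push_cast; ring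
    rw [hs1, ih (s + 1) _ _ (by omega)]
    rw [parsFrom_cons arr s (by omega)]
    have htri := tri_succ k
    simp only [eqp, Prod.mk.injEq]
    constructor <;> push_cast <;> omega

-- characterisation of A
lemma p_slow_eq (arr : List Int) :
    p_slow arr = [(eqp (parsFrom arr 0) : Int),
                  (tri arr.length : Int) - (eqp (parsFrom arr 0) : Int)] := by
  have h := outer_fold arr arr.length 0 0 0 (by omega)
  push_cast at h
  simp only [p_slow]
  rw [h]
  norm_num

-- === B side ===

-- the running parities produced by B's loop
def runPars (p : Int) : List Int → List Int
  | [] => []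
  | x :: t => (p + x) % 2 :: runPars ((p + x) % 2) t

-- B's loop, characterised: it counts zeros/ones of the running-parity chain
lemma b_fold (l : List Int) : ∀ (c0 c1 p : Int),
    l.foldl (fun (st : Int × Int × Int) x =>
        if PySem.Int.mod (st.2.2 + x) 2 == 0
        then (st.1 + 1, st.2.1, PySem.Int.mod (st.2.2 + x) 2)
        else (st.1, st.2.1 + 1, PySem.Int.mod (st.2.2 + x) 2)) (c0, c1, p)
      = (c0 + ((runPars p l).count 0 : Int),
         c1 + ((l.length : Int) - ((runPars p l).count 0 : Int)),
         (runPars p l).getLastD p) := by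
  induction l with
  | nil => intro c0 c1 p; simp [runPars]
  | cons x t ih =>
    intro c0 c1 p
    have hmod : PySem.Int.mod (p + x) 2 = (p + x) % 2 :=
      PySem.Int.mod_eq_emod_of_pos (by norm_num)
    have hrp : runPars p (x :: t) = (p + x) % 2 :: runPars ((p + x) % 2) t := rfl
    by_cases h : (p + x) % 2 = 0
    · simp only [List.foldl_cons, hmod, h]
      rw [show ((0 : Int) == 0) = true by simp]
      simp only [if_true, ih, hrp, h, List.count_cons, List.length_cons, Prod.mk.injEq]
      refine ⟨?_, ?_, by rw [List.getLastD_cons]⟩ <;> (simp; try ring)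
    · simp only [List.foldl_cons, hmod]
      rw [if_neg (by simpa using h)]
      rw [ih]
      simp only [hrp, List.count_cons, List.length_cons, Prod.mk.injEq]
      refine ⟨?_, ?_, by rw [List.getLastD_cons]⟩ <;> (simp [h]; try ring)

-- the running-parity chain is the parities of the prefix sums (shifted by p)
lemma runPars_eq (l : List Int) : ∀ (p : Int),
    runPars p l = (List.range l.length).map (fun k => (p + psum l (k + 1)) % 2) := by
  induction l with
  | nil => intro p; simp [runPars]
  | cons x t ih =>
    intro p
    show (p + x) % 2 :: runPars ((p + x) % 2) t = _
    rw [List.length_cons, List.range_succ_eq_map, List.map_cons, List.map_map]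
    congr 1
    · unfold psum; simp
    · rw [ih]
      apply List.map_congr_left
      intro k _
      show ((p + x) % 2 + psum t (k + 1)) % 2 = (p + psum (x :: t) (k + 1 + 1)) % 2
      have hps : psum (x :: t) (k + 2) = x + psum t (k + 1) := by
        unfold psum; rw [List.take_succ_cons, List.sum_cons]
      rw [hps, Int.emod_add_emod]
      ring_nf

-- count of zeros in the chain started at 0 = count of even later prefix parities
lemma runPars_count (arr : List Int) :
    (runPars 0 arr).count 0 = (List.range arr.length).countP (fun k => ppar arr (k + 1)) := by
  rw [runPars_eq, List.count_eq_countP, List.countP_map]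
  apply List.countP_congr
  intro k _
  simp [ppar]

-- counts of true/false prefix parities
lemma count_parsFrom_true (arr : List Int) :
    (parsFrom arr 0).count true = 1 + (List.range arr.length).countP (fun k => ppar arr (k + 1)) := by
  rw [parsFrom_cons arr 0 (by omega), List.count_cons]
  have h0 : ppar arr 0 = true := by unfold ppar psum; simp
  rw [h0]
  unfold parsFrom
  rw [List.count_eq_countP, List.countP_map]
  have h1 : arr.length + 1 - 1 = arr.length := by omega
  rw [h1, List.range'_eq_map_range, List.countP_map]
  have h2 : List.countP (((fun (x : Bool) => x == true) ∘ ppar arr) ∘ fun x => 0 + 1 + x) (List.range arr.length)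
      = List.countP (fun k => ppar arr (k + 1)) (List.range arr.length) := by
    apply List.countP_congr
    intro k _
    simp [Nat.add_comm]
  rw [h2]
  simp [Nat.add_comm]

lemma count_parsFrom_false (arr : List Int) :
    (parsFrom arr 0).count false = arr.length - (List.range arr.length).countP (fun k => ppar arr (k + 1)) := by
  have hlen : (parsFrom arr 0).length = arr.length + 1 := by
    unfold parsFrom; simp
  have hsum : (parsFrom arr 0).count true + (parsFrom arr 0).count false = arr.length + 1 := by
    rw [← hlen]
    simp only [List.count_eq_countP]
    have h3 : List.countP (fun (x : Bool) => x == false) (parsFrom arr 0)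
        = List.countP (fun (a : Bool) => decide ¬(a == true) = true) (parsFrom arr 0) := by
      apply List.countP_congr
      intro b _
      cases b <;> simp
    rw [h3, ← List.length_eq_countP_add_countP (fun (x : Bool) => x == true)]
  have hle : (List.range arr.length).countP (fun k => ppar arr (k + 1)) ≤ arr.length := by
    have := List.countP_le_length (l := List.range arr.length) (p := fun k => ppar arr (k + 1))
    simpa using this
  have := count_parsFrom_true arr
  omega

-- equal-pair count = C(ct,2) + C(cf,2)
lemma half_succ (m : Nat) : (m + 1) * m / 2 = m + m * (m - 1) / 2 := by
  cases m with
  | zero => rfl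
  | succ k =>
    have h : (k + 2) * (k + 1) = (k + 1) * k + (k + 1) * 2 := by ring
    rw [h, Nat.add_mul_div_right _ _ (by norm_num)]
    simp only [Nat.add_sub_cancel]
    omega

lemma eqp_binom (l : List Bool) :
    eqp l = l.count true * (l.count true - 1) / 2 + l.count false * (l.count false - 1) / 2 := by
  induction l with
  | nil => rfl
  | cons a t ih =>
    cases a
    · rw [show eqp (false :: t) = t.count false + eqp t from rfl, ih]
      rw [List.count_cons_self, List.count_cons_of_ne (by simp)]
      simp only [Nat.add_sub_cancel]
      have := half_succ (t.count false)
      omega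
    · rw [show eqp (true :: t) = t.count true + eqp t from rfl, ih]
      rw [List.count_cons_self, List.count_cons_of_ne (by simp)]
      simp only [Nat.add_sub_cancel]
      have := half_succ (t.count true)
      omega

-- floordiv of the nonnegative products as Nat arithmetic
lemma floordiv_binom (c : Nat) :
    PySem.Int.floordiv ((c : Int) * ((c : Int) - 1)) 2 = ((c * (c - 1) / 2 : Nat) : Int) := by
  cases c with
  | zero => simp [PySem.Int.floordiv]
  | succ k =>
    have h : ((k + 1 : Nat) : Int) * (((k + 1 : Nat) : Int) - 1) = (((k + 1) * k : Nat) : Int) := by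
      push_cast; ring
    rw [h]
    simp only [Nat.add_sub_cancel]
    exact_mod_cast PySem.Int.floordiv_natCast ((k + 1) * k) 2

lemma floordiv_tri (n : Nat) :
    PySem.Int.floordiv ((n : Int) * ((n : Int) + 1)) 2 = (tri n : Int) := by
  have h : (n : Int) * ((n : Int) + 1) = ((n * (n + 1) : Nat) : Int) := by push_cast; ring
  rw [h]
  unfold tri
  exact_mod_cast PySem.Int.floordiv_natCast (n * (n + 1)) 2

-- characterisation of B
lemma p_slow_alt_eq (arr : List Int) :
    p_slow_alt arr = [(eqp (parsFrom arr 0) : Int),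
                      (tri arr.length : Int) - (eqp (parsFrom arr 0) : Int)] := by
  simp only [p_slow_alt]
  rw [b_fold]
  have hc0 : (1 : Int) + ((runPars 0 arr).count 0 : Int) = ((parsFrom arr 0).count true : Int) := by
    rw [runPars_count, count_parsFrom_true]; push_cast; ring
  have hc1 : (0 : Int) + ((arr.length : Int) - ((runPars 0 arr).count 0 : Int))
      = ((parsFrom arr 0).count false : Int) := by
    rw [runPars_count, count_parsFrom_false]
    have hle : (List.range arr.length).countP (fun k => ppar arr (k + 1)) ≤ arr.length := by
      have := List.countP_le_length (l := List.range arr.length) (p := fun k => ppar arr (k + 1))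
      simpa using this
    omega
  simp only [hc0, hc1]
  rw [floordiv_binom, floordiv_binom, floordiv_tri]
  rw [eqp_binom (parsFrom arr 0)]
  rw [Nat.cast_add]

-- ===== VERDICT (by name: the statement is the Claim_ definition above) =====
theorem p_slow_spec : Claim_equal_p_slow := by
  intro arr _
  unfold Spec_p_slow
  rw [p_slow_eq, p_slow_alt_eq]
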